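-- pv_equiv track=rewrite | github.com/zephyrpathsofglory/python-demos | algorithms/leetcode/407.py | _max_containing_water_one_dimension
-- ===== SOURCE A (Python) =====
-- from typing import List
--
-- def _max_containing_water_one_dimension(heights: List[int]) -> List[int]:
--     states = [[i] for i in heights]
--     max = 0
--     lenz = len(heights)
--
--     for idx in range(lenz):
--         height = heights[idx]
--         if height > max:
--             max = height
--
--         states[idx].append(max)
--
--     max = 0
--     idx = lenz - 1
--     while idx >= 0:
--         height = heights[idx]
--         if height > max:
--             max = height
--
--         states[idx].append(max)
--         idx -= 1
--
--     waters = []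
--     for state in states:
--         waters.append(min(state[2], state[1]) - state[0])
--
--     return waters
-- ===== SOURCE B (Python) =====
-- from typing import List
--
-- def _max_containing_water_one_dimension(heights: List[int]) -> List[int]:
--     n = len(heights)
--     water = [0] * n
--     left, right = 0, n - 1
--     left_max = right_max = 0
--     while left <= right:
--         if heights[left] < heights[right]:
--             left_max = max(left_max, heights[left])
--             water[left] = left_max - heights[left]
--             left += 1
--         else:
--             right_max = max(right_max, heights[right])
--             water[right] = right_max - heights[right]
--             right -= 1
--     return water
-- ===== Notes on version B (the rewrite author's own statement) =====
-- stated objective: faster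
-- what changed: Replaced A's three passes with an auxiliary per-index states table (prefix-max pass, suffix-max pass, combining pass) by the classic two-pointer scan that fills the answer array in a single loop with O(1) extra state.
import Mathlib
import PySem

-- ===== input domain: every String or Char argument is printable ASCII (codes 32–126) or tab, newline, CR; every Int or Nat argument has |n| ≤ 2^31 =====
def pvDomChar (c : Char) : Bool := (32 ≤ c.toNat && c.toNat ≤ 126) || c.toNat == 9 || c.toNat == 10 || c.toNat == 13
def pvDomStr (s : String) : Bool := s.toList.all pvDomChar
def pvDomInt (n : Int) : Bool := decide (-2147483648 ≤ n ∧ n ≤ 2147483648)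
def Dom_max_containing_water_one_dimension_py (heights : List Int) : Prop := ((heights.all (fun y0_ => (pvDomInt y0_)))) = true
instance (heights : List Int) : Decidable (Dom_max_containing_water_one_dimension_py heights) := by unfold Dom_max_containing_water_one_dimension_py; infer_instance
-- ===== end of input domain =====

-- B replaces A's three passes over an auxiliary per-index states table by the classic
-- two-pointer scan filling the answer array in one loop with O(1) extra state.

-- ===== PORT A =====
-- literal transliteration of A: states = [[i] for i in heights]; a forward pass appending
-- the running max, a backward while-loop appending the backward running max (rendered as a
-- fold over the countdown range, exactly the indices the while loop visits), then a loop
-- building waters by appending.  All indices are in range, so pyGetD/pySetD are exact.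
def max_containing_water_one_dimension_py (heights : List Int) : List Int :=
  let states0 : List (List Int) := heights.map (fun i => [i])
  let lenz : Int := (heights.length : Int)
  let st1 := (PySem.List.pyRange 0 lenz 1).foldl (fun (st : Int × List (List Int)) idx =>
      let height := PySem.List.pyGetD heights idx 0
      let m := if height > st.1 then height else st.1
      (m, PySem.List.pySetD st.2 idx (PySem.List.pyGetD st.2 idx [] ++ [m]))) (0, states0)
  let st2 := (PySem.List.pyRange (lenz - 1) (-1) (-1)).foldl (fun (st : Int × List (List Int)) idx =>
      let height := PySem.List.pyGetD heights idx 0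
      let m := if height > st.1 then height else st.1
      (m, PySem.List.pySetD st.2 idx (PySem.List.pyGetD st.2 idx [] ++ [m]))) (0, st1.2)
  st2.2.foldl (fun waters state =>
      waters ++ [min (PySem.List.pyGetD state 2 0) (PySem.List.pyGetD state 1 0)
                  - PySem.List.pyGetD state 0 0]) []

-- ===== PORT B =====
-- the while-loop of Source B: two pointers l, r with running maxes, writing into water
def pvAltLoop (heights : List Int) (water : List Int) (l r lm rm : Int) : List Int :=
  if h : l ≤ r then
    let hl := PySem.List.pyGetD heights l 0
    let hr := PySem.List.pyGetD heights r 0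
    if hl < hr then
      pvAltLoop heights (PySem.List.pySetD water l (max lm hl - hl)) (l + 1) r (max lm hl) rm
    else
      pvAltLoop heights (PySem.List.pySetD water r (max rm hr - hr)) l (r - 1) lm (max rm hr)
  else water
termination_by (r + 1 - l).toNat
decreasing_by · omega
              · omega

def max_containing_water_one_dimension_py_alt (heights : List Int) : List Int :=
  pvAltLoop heights (List.replicate heights.length 0) 0 ((heights.length : Int) - 1) 0 0

-- ===== PRECONDITION & SPEC =====
def Spec_max_containing_water_one_dimension_py (heights : List Int) (out : List Int) : Prop := out = max_containing_water_one_dimension_py_alt heights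
instance (heights : List Int) (out : List Int) : Decidable (Spec_max_containing_water_one_dimension_py heights out) := by unfold Spec_max_containing_water_one_dimension_py; infer_instance

-- ===== CLAIM (what is proved, stated in full; the proofs are below) =====
def Claim_equal_max_containing_water_one_dimension_py : Prop := ∀ (heights : List Int), Dom_max_containing_water_one_dimension_py heights → Spec_max_containing_water_one_dimension_py heights (max_containing_water_one_dimension_py heights)

-- ===== LEMMAS AND PROOFS =====

-- prefix max (with floor 0) of the first k elements, and suffix max from index k on
def pvP (h : List Int) (k : Nat) : Int := (h.take k).foldl max 0
def pvS (h : List Int) (k : Nat) : Int := (h.drop k).foldr max 0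

-- the common value both programs compute
def pvSpecList (h : List Int) : List Int :=
  (List.range h.length).map (fun i => min (pvS h i) (pvP h (i + 1)) - h.getD i 0)

theorem pvP_zero (h : List Int) : pvP h 0 = 0 := rfl

theorem pvP_succ (h : List Int) {k : Nat} (hk : k < h.length) :
    pvP h (k + 1) = max (pvP h k) (h.getD k 0) := by
  unfold pvP
  rw [List.take_add_one, List.getElem?_eq_getElem hk, List.foldl_append]
  simp [List.getElem?_eq_getElem hk]

theorem pvS_len (h : List Int) : pvS h h.length = 0 := by simp [pvS]

theorem pvS_succ (h : List Int) {k : Nat} (hk : k < h.length) :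
    pvS h k = max (h.getD k 0) (pvS h (k + 1)) := by
  rw [pvS, List.drop_eq_getElem_cons hk, List.foldr_cons, List.getD_eq_getElem h 0 hk, pvS]

theorem pvS_nonneg (h : List Int) (k : Nat) : 0 ≤ pvS h k := by
  unfold pvS
  induction h.drop k with
  | nil => simp
  | cons x xs ih => simp only [List.foldr_cons]; exact le_trans ih (le_max_right _ _)

theorem pvP_nonneg (h : List Int) (k : Nat) : 0 ≤ pvP h k :=
  (PySem.List.le_foldl_max (h.take k) 0).1

theorem pvP_mono (h : List Int) {k m : Nat} (hkm : k ≤ m) : pvP h k ≤ pvP h m := by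
  unfold pvP
  conv_rhs => rw [← List.take_append_drop k (h.take m)]
  rw [List.take_take, Nat.min_eq_left hkm, List.foldl_append]
  exact (PySem.List.le_foldl_max _ _).1

theorem pvS_anti (h : List Int) {k m : Nat} (hkm : k ≤ m) (hm : m ≤ h.length) :
    pvS h m ≤ pvS h k := by
  induction m with
  | zero => have hk0 : k = 0 := by omega
            subst hk0; exact le_refl _
  | succ j ih =>
    rcases Nat.eq_or_lt_of_le hkm with he | hlt
    · subst he; exact le_refl _
    · have hj : j < h.length := by omega
      have h1 : pvS h (j + 1) ≤ pvS h j := by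
        rw [pvS_succ h hj]; exact le_max_right _ _
      exact le_trans h1 (ih (by omega) (by omega))

theorem pv_ite_max (a b : Int) : (if b > a then b else a) = max a b := by
  rcases le_total a b with hle | hle <;> simp [max_def, hle] <;> omega

-- setting one entry of a mapped range
theorem pv_set_map_range {α : Type} (n k : Nat) (f g : Nat → α) (v : α) (hk : k < n)
    (hfg : ∀ i, i ≠ k → f i = g i) (hgk : g k = v) :
    ((List.range n).map f).set k v = (List.range n).map g := by
  apply List.ext_getElem
  · simp
  · intro i hi hi'
    simp only [List.length_set, List.length_map, List.length_range] at hi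
    by_cases hik : k = i
    · subst hik
      rw [List.getElem_set, if_pos rfl, List.getElem_map, List.getElem_range, hgk]
    · rw [List.getElem_set, if_neg hik, List.getElem_map, List.getElem_map,
          List.getElem_range]
      exact hfg i (fun he => hik he.symm)

-- state of the A-side table after the forward pass has processed indices < k
def pvStamp1 (h : List Int) (k : Nat) : List (List Int) :=
  (List.range h.length).map (fun i =>
    if i < k then [h.getD i 0, pvP h (i + 1)] else [h.getD i 0])

-- state of the A-side table after the backward pass has processed indices ≥ j
def pvStamp2 (h : List Int) (j : Nat) : List (List Int) :=
  (List.range h.length).map (fun i =>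
    if i < j then [h.getD i 0, pvP h (i + 1)] else [h.getD i 0, pvP h (i + 1), pvS h i])

theorem pv_getD_map_range {α : Type} (n k : Nat) (f : Nat → α) (d : α) (hk : k < n) :
    ((List.range n).map f).getD k d = f k := by
  rw [List.getD_eq_getElem _ d (by simpa using hk)]
  simp

-- the forward pass computes prefix maxes
theorem pv_phase1 (h : List Int) (k : Nat) (hk : k ≤ h.length) :
    (PySem.List.pyRange 0 (k : Int) 1).foldl (fun (st : Int × List (List Int)) idx =>
      let height := PySem.List.pyGetD h idx 0
      let m := if height > st.1 then height else st.1
      (m, PySem.List.pySetD st.2 idx (PySem.List.pyGetD st.2 idx [] ++ [m])))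
      (0, h.map (fun i => [i]))
    = (pvP h k, pvStamp1 h k) := by
  induction k with
  | zero =>
    rw [PySem.List.pyRange_one_eq_nil (by omega)]
    simp only [List.foldl_nil, pvP_zero]
    congr 1
    unfold pvStamp1
    apply List.ext_getElem
    · simp
    · intro i hi hi'
      have hin : i < h.length := by simpa using hi
      simp [List.getD_eq_getElem h 0 hin, List.getElem?_eq_getElem hin]
  | succ k ih =>
    have hk' : k < h.length := by omega
    have hcast : ((k : Int) + 1) = ((k + 1 : Nat) : Int) := by push_cast; ring
    rw [← hcast, PySem.List.pyRange_one_succ_right (by omega), List.foldl_append,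
        ih (by omega), List.foldl_cons, List.foldl_nil]
    simp only [PySem.List.pyGetD_natCast, PySem.List.pySetD_natCast]
    have hgd : (pvStamp1 h k).getD k ([] : List Int) = [h.getD k 0] := by
      unfold pvStamp1
      rw [pv_getD_map_range h.length k _ ([] : List Int) hk']
      simp
    have hm : (if h.getD k 0 > pvP h k then h.getD k 0 else pvP h k) = pvP h (k + 1) := by
      rw [pv_ite_max, ← pvP_succ h hk']
    rw [hgd, hm]
    congr 1
    unfold pvStamp1
    apply pv_set_map_range _ _ _ _ _ hk'
    · intro i hik
      by_cases hi : i < k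
      · simp [hi, Nat.lt_succ_of_lt hi]
      · have : ¬ i < k + 1 := by omega
        simp [hi, this]
    · simp

-- the backward pass computes suffix maxes
theorem pv_phase2 (h : List Int) (j : Nat) (hj : j ≤ h.length) :
    (PySem.List.pyRange ((j : Int) - 1) (-1) (-1)).foldl
      (fun (st : Int × List (List Int)) idx =>
      let height := PySem.List.pyGetD h idx 0
      let m := if height > st.1 then height else st.1
      (m, PySem.List.pySetD st.2 idx (PySem.List.pyGetD st.2 idx [] ++ [m])))
      (pvS h j, pvStamp2 h j)
    = (pvS h 0, pvStamp2 h 0) := by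
  induction j with
  | zero =>
    rw [show ((0 : Nat) : Int) - 1 = -1 by ring, PySem.List.pyRange_neg_one_eq_nil (by omega)]
    simp only [List.foldl_nil]
  | succ j ih =>
    have hj' : j < h.length := by omega
    have hc : ((j + 1 : Nat) : Int) - 1 = (j : Int) := by push_cast; ring
    rw [hc, PySem.List.pyRange_neg_one_cons (by omega), List.foldl_cons]
    simp only [PySem.List.pyGetD_natCast, PySem.List.pySetD_natCast]
    have hgd : (pvStamp2 h (j + 1)).getD j ([] : List Int) = [h.getD j 0, pvP h (j + 1)] := by
      unfold pvStamp2
      rw [pv_getD_map_range h.length j _ ([] : List Int) hj']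
      simp
    rw [hgd]
    have hm : (if h.getD j 0 > pvS h (j + 1) then h.getD j 0 else pvS h (j + 1)) = pvS h j := by
      rw [pv_ite_max, max_comm, ← pvS_succ h hj']
    rw [hm]
    have hset : (pvStamp2 h (j + 1)).set j ([h.getD j 0, pvP h (j + 1)] ++ [pvS h j]) = pvStamp2 h j := by
      unfold pvStamp2
      apply pv_set_map_range _ _ _ _ _ hj'
      · intro i hij
        by_cases hi : i < j
        · simp [hi, Nat.lt_succ_of_lt hi]
        · have : ¬ i < j + 1 := by omega
          simp [hi, this]
      · simp
    rw [hset]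
    exact ih (by omega)

-- A computes pvSpecList
theorem pvA_eq (h : List Int) : max_containing_water_one_dimension_py h = pvSpecList h := by
  unfold max_containing_water_one_dimension_py
  simp only []
  rw [pv_phase1 h h.length (le_refl _)]
  have h12 : pvStamp1 h h.length = pvStamp2 h h.length := by
    unfold pvStamp1 pvStamp2
    apply List.map_congr_left
    intro i hi
    rw [List.mem_range] at hi
    simp [hi]
  rw [h12]
  have hph2 := pv_phase2 h h.length (le_refl _)
  rw [pvS_len h] at hph2
  rw [hph2]
  unfold pvStamp2 pvSpecList
  rw [PySem.List.foldl_append_singleton_eq_map, List.map_map]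
  apply List.map_congr_left
  intro i hi
  rw [List.mem_range] at hi
  simp [hi]
  rfl

-- the two-pointer loop invariant: once both maxes are the true prefix/suffix maxes and they
-- are dominated by the opposite side's max, the loop fills in pvSpecList
theorem pvAltLoop_eq (h : List Int) (gas : Nat) :
    ∀ (l r : Int) (w : List Int) (lm rm : Int),
    (r + 1 - l).toNat ≤ gas →
    0 ≤ l → r < (h.length : Int) → l ≤ r + 1 →
    w.length = h.length →
    (∀ i : Nat, i < h.length → ((i : Int) < l ∨ r < (i : Int)) →
      w.getD i 0 = min (pvS h i) (pvP h (i + 1)) - h.getD i 0) →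
    lm = pvP h l.toNat → rm = pvS h (r + 1).toNat →
    (l ≤ r → lm ≤ pvS h l.toNat ∧ rm ≤ pvP h (r + 1).toNat) →
    pvAltLoop h w l r lm rm = pvSpecList h := by
  induction gas with
  | zero =>
    intro l r w lm rm hgas h0 hr hlr hlen hout _ _ _
    have hgt : ¬ l ≤ r := by omega
    rw [pvAltLoop, dif_neg hgt]
    apply List.ext_getElem
    · simp [pvSpecList, hlen]
    · intro i hi hi'
      have hin : i < h.length := by omega
      have := hout i hin (by omega)
      rw [List.getD_eq_getElem w 0 hi] at this
      rw [this]
      simp [pvSpecList]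
  | succ gas ih =>
    intro l r w lm rm hgas h0 hr hlr hlen hout hlm hrm hinv
    by_cases hle : l ≤ r
    · rw [pvAltLoop, dif_pos hle]
      have hl0 : 0 ≤ l := h0
      have hr0 : 0 ≤ r := by omega
      have hltn : l.toNat < h.length := by omega
      have hrtn : r.toNat < h.length := by omega
      have hgl : PySem.List.pyGetD h l 0 = h.getD l.toNat 0 := by
        rw [PySem.List.pyGetD_eq_getElem h 0 hl0 (by omega), List.getD_eq_getElem h 0 hltn]
      have hgr : PySem.List.pyGetD h r 0 = h.getD r.toNat 0 := by
        rw [PySem.List.pyGetD_eq_getElem h 0 hr0 (by omega), List.getD_eq_getElem h 0 hrtn]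
      obtain ⟨hlmS, hrmP⟩ := hinv hle
      have hhl_le_Sl : h.getD l.toNat 0 ≤ pvS h l.toNat := by
        rw [pvS_succ h hltn]; exact le_max_left _ _
      have hhl_le_Pr : h.getD l.toNat 0 ≤ pvP h (r.toNat + 1) := by
        have h1 : h.getD l.toNat 0 ≤ pvP h (l.toNat + 1) := by
          rw [pvP_succ h hltn]; exact le_max_right _ _
        exact le_trans h1 (pvP_mono h (by omega))
      have he1 : (r + 1).toNat = r.toNat + 1 := by omega
      have hrmP' : rm ≤ pvP h (r.toNat + 1) := he1 ▸ hrmP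
      dsimp only
      split_ifs with hcmp
      · -- heights[left] < heights[right]
        rw [hgl, hgr] at hcmp
        have hlmP : max lm (PySem.List.pyGetD h l 0) = pvP h (l.toNat + 1) := by
          rw [hgl, hlm, ← pvP_succ h hltn]
        have hPleS : pvP h (l.toNat + 1) ≤ pvS h l.toNat := by
          rw [pvP_succ h hltn]
          exact max_le (hlm ▸ hlmS) hhl_le_Sl
        apply ih (l + 1) r _ _ _ (by omega) (by omega) hr (by omega)
          (by rw [PySem.List.pySetD_of_nonneg _ _ hl0]; simp [hlen])
        · intro i hi hside
          rw [PySem.List.pySetD_of_nonneg _ _ hl0, hlmP]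
          by_cases hieq : i = l.toNat
          · subst hieq
            rw [List.getD_eq_getElem _ 0 (by simp [hlen]; omega), List.getElem_set]
            simp [hgl, min_eq_right hPleS]
          · have hne : l.toNat ≠ i := fun he => hieq he.symm
            rw [List.getD_eq_getElem _ 0 (by simp [hlen]; omega), List.getElem_set,
                if_neg hne, ← List.getD_eq_getElem w 0 (by omega)]
            exact hout i hi (by omega)
        · rw [hlmP]; congr 1; omega
        · exact hrm
        · intro hle'
          have hlt1 : (l + 1).toNat = l.toNat + 1 := by omega
          have hS1 : h.getD r.toNat 0 ≤ pvS h (l.toNat + 1) := by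
            have hb : h.getD r.toNat 0 ≤ pvS h r.toNat := by
              rw [pvS_succ h hrtn]; exact le_max_left _ _
            exact le_trans hb (pvS_anti h (by omega) (by omega))
          have hS2 : h.getD l.toNat 0 ≤ pvS h (l.toNat + 1) :=
            le_trans (le_of_lt hcmp) hS1
          have hSeq : pvS h l.toNat = pvS h (l.toNat + 1) := by
            rw [pvS_succ h hltn, max_eq_right hS2]
          constructor
          · rw [hlmP, hlt1, pvP_succ h hltn]
            exact max_le (hlm ▸ (hSeq ▸ hlmS)) hS2
          · exact hrmP
      · -- heights[left] >= heights[right]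
        rw [hgl, hgr] at hcmp
        push_neg at hcmp
        have hrmS : max rm (PySem.List.pyGetD h r 0) = pvS h r.toNat := by
          rw [hgr, hrm, he1, pvS_succ h hrtn, max_comm]
        have hSleP : pvS h r.toNat ≤ pvP h (r.toNat + 1) := by
          rw [pvS_succ h hrtn]
          apply max_le (le_trans hcmp hhl_le_Pr)
          calc pvS h (r.toNat + 1) = rm := by rw [hrm, he1]
            _ ≤ pvP h (r.toNat + 1) := hrmP'
        apply ih l (r - 1) _ _ _ (by omega) h0 (by omega) (by omega)
          (by rw [PySem.List.pySetD_of_nonneg _ _ hr0]; simp [hlen])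
        · intro i hi hside
          rw [PySem.List.pySetD_of_nonneg _ _ hr0, hrmS]
          by_cases hieq : i = r.toNat
          · subst hieq
            rw [List.getD_eq_getElem _ 0 (by simp [hlen]; omega), List.getElem_set]
            simp [hgr, min_eq_left hSleP]
          · have hne : r.toNat ≠ i := fun he => hieq he.symm
            rw [List.getD_eq_getElem _ 0 (by simp [hlen]; omega), List.getElem_set,
                if_neg hne, ← List.getD_eq_getElem w 0 (by omega)]
            exact hout i hi (by omega)
        · exact hlm
        · rw [hrmS]; congr 1; omega
        · intro hle'
          refine ⟨hlmS, ?_⟩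
          rw [hrmS]
          have he2 : (r - 1 + 1).toNat = r.toNat := by omega
          rw [he2]
          have hhrP : h.getD r.toNat 0 ≤ pvP h r.toNat := by
            have h2 : h.getD l.toNat 0 ≤ pvP h (l.toNat + 1) := by
              rw [pvP_succ h hltn]; exact le_max_right _ _
            exact le_trans hcmp (le_trans h2 (pvP_mono h (by omega)))
          have hPfold : pvP h (r.toNat + 1) = pvP h r.toNat := by
            rw [pvP_succ h hrtn, max_eq_left hhrP]
          rw [pvS_succ h hrtn]
          apply max_le hhrP
          calc pvS h (r.toNat + 1) = rm := by rw [hrm, he1]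
            _ ≤ pvP h (r.toNat + 1) := hrmP'
            _ = pvP h r.toNat := hPfold
    · rw [pvAltLoop, dif_neg hle]
      apply List.ext_getElem
      · simp [pvSpecList, hlen]
      · intro i hi hi'
        have hin : i < h.length := by omega
        have := hout i hin (by omega)
        rw [List.getD_eq_getElem w 0 hi] at this
        rw [this]
        simp [pvSpecList]

-- B computes pvSpecList
theorem pvB_eq (h : List Int) : max_containing_water_one_dimension_py_alt h = pvSpecList h := by
  unfold max_containing_water_one_dimension_py_alt
  apply pvAltLoop_eq h h.length 0 ((h.length : Int) - 1) _ 0 0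
  · omega
  · omega
  · omega
  · omega
  · simp
  · intro i hi hside
    exfalso
    omega
  · simp [pvP_zero]
  · rw [show ((h.length : Int) - 1 + 1) = (h.length : Int) by ring]
    rw [show ((h.length : Int)).toNat = h.length by omega, pvS_len]
  · intro hle
    constructor
    · simp [pvP_zero, pvS_nonneg]
    · rw [show ((h.length : Int) - 1 + 1) = (h.length : Int) by ring,
          show ((h.length : Int)).toNat = h.length by omega]
      exact pvP_nonneg h _

-- ===== VERDICT (by name: the statement is the Claim_ definition above) =====
theorem max_containing_water_one_dimension_py_spec : Claim_equal_max_containing_water_one_dimension_py := by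
  intro heights _
  unfold Spec_max_containing_water_one_dimension_py
  rw [pvA_eq, pvB_eq]
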